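-- pv_equiv track=rewrite | github.com/Animesh6096/CSE221 | Lab6/task3.py | shortest_max_weight
-- ===== SOURCE A (Python) =====
-- import heapq
--
-- def shortest_max_weight(graph, start, dest):
--     dist = [float('inf')] * (len(graph) + 1)
--     dist[start] = 0
--     pq = [(0, start)]
--
--     while pq:
--         d, node = heapq.heappop(pq)
--         if node == dest:
--             return d
--
--         for nb, wt in graph[node]:
--             new_d = max(d, wt)
--             if new_d < dist[nb]:
--                 dist[nb] = new_d
--                 heapq.heappush(pq, (new_d, nb))
--
--     return -1
-- ===== SOURCE B (Python) =====
-- def shortest_max_weight(graph, start, dest):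
--     if start == dest:
--         return 0
--     INF = float('inf')
--     n = len(graph) + 1
--     dist = [INF] * n
--     dist[start] = 0
--     visited = [False] * n
--     while True:
--         u = -1
--         best = INF
--         for v in range(n):
--             if not visited[v] and dist[v] < best:
--                 best = dist[v]
--                 u = v
--         if u == -1:
--             return -1
--         if u == dest:
--             return dist[u]
--         visited[u] = True
--         for nb, wt in graph[u]:
--             nd = max(dist[u], wt)
--             if nd < dist[nb]:
--                 dist[nb] = nd
-- ===== Notes on version B (the rewrite author's own statement) =====
-- stated objective: alternative
-- what changed: Replaces A's lazy-deletion binary heap (heapq with stale entries) by an explicit start==dest guard, a visited-boolean array and a linear scan for the unvisited node with the smallest finite dist; the relaxation is the same but no priority queue is built or popped.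
-- outside the precondition, e.g. on shortest_max_weight({-1: [(0, 1)], 0: []}, -1, 0): A returns 1, B raises KeyError; on shortest_max_weight({0: [(1, 1), (2, 99)], 1: []}, 0, 1): A returns 1, B returns 1
import Mathlib
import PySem

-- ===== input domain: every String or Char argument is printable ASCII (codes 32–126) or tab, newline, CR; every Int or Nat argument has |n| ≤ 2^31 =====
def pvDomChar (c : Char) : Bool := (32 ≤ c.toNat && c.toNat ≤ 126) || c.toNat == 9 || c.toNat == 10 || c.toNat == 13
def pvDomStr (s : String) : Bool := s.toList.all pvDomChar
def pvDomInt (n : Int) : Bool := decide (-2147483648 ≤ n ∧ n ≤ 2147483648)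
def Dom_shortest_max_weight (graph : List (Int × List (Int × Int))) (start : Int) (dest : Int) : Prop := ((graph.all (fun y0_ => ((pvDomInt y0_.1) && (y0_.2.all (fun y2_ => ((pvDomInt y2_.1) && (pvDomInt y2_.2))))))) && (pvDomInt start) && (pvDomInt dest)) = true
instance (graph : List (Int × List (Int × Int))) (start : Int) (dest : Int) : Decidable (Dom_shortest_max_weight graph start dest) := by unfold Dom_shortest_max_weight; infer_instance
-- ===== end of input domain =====

-- B replaces A's lazy-deletion binary heap by a visited array with a linear minimum scan
-- (same relaxation, different driving data structure); equivalence of the RETURN value is proved on Pre_.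

-- dict lookup (first matching key; Python dicts have unique keys — Pre_ demands Nodup keys)
def adjFind (graph : List (Int × List (Int × Int))) (u : Int) : Option (List (Int × Int)) :=
  match graph with
  | [] => none
  | (k, l) :: rest => if k = u then some l else adjFind rest u

-- `a < b` where `b : Option Int` encodes a value of dist (none = float('inf'))
def ltO (a : Int) (b : Option Int) : Bool :=
  match b with
  | none => true
  | some x => decide (a < x)

-- ===== PORT A =====
-- heapq as a multiset: heappop returns the least tuple (lexicographic); exact, since equal
-- tuples are indistinguishable.  pqMinA finds it, List.erase removes one occurrence.
def pqMinA : List (Int × Int) → Option (Int × Int)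
  | [] => none
  | p :: rest =>
    some (match pqMinA rest with
          | none => p
          | some q => if q.1 < p.1 ∨ (q.1 = p.1 ∧ q.2 < p.2) then q else p)

-- the inner `for nb, wt in graph[node]` loop; none = IndexError on dist[nb]
def relaxA (d : Int) : List (Int × Int) → List (Option Int) → List (Int × Int) →
    Option (List (Option Int) × List (Int × Int))
  | [], dist, pq => some (dist, pq)
  | (nb, wt) :: rest, dist, pq =>
    match PySem.List.pyGet? dist nb with
    | none => none
    | some dnb =>
      let nd := max d wt
      if ltO nd dnb then
        relaxA d rest (PySem.List.pySetD dist nb (some nd)) (pq ++ [(nd, nb)])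
      else relaxA d rest dist pq

-- the `while pq:` loop; fuel is a Lean artifact (proved sufficient below); none = exception/fuel
def loopA (graph : List (Int × List (Int × Int))) (dest : Int) :
    Nat → List (Option Int) → List (Int × Int) → Option Int
  | _, _, [] => some (-1)
  | 0, _, _ => none
  | fuel + 1, dist, pq =>
    match pqMinA pq with
    | none => some (-1)
    | some (d, node) =>
      let rest := pq.erase (d, node)
      if node = dest then some d
      else
        match adjFind graph node with
        | none => none
        | some adjl =>
          match relaxA d adjl dist rest with
          | none => none
          | some (dist', pq') => loopA graph dest fuel dist' pq'

def shortest_max_weight (graph : List (Int × List (Int × Int))) (start : Int) (dest : Int) : Int :=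
  let n := graph.length
  let dist := PySem.List.pySetD (List.replicate (n + 1) (none : Option Int)) start (some 0)
  let fuel := 2 * (n + 1) * ((graph.flatMap (fun p => p.2)).length + 1) + 2
  (loopA graph dest fuel dist [(0, start)]).getD 0

-- ===== PORT B =====
-- the `for v in range(n)` selection scan of Source B: keeps the first unvisited index with the
-- strictly smallest finite dist (u = -1, best = INF accumulator become an Option)
def selB : List (Option Int) → List Bool → Nat → Option (Nat × Int) → Option (Nat × Int)
  | [], _, _, best => best
  | _, [], _, best => best
  | dv :: ds, bv :: bs, v, best =>
    let best' :=
      if bv then best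
      else
        match dv with
        | none => best
        | some x =>
          match best with
          | none => some (v, x)
          | some (_, b) => if x < b then some (v, x) else best
    selB ds bs (v + 1) best'

-- the inner relaxation loop of Source B (dist only; there is no priority queue to thread)
def relaxB (du : Int) : List (Int × Int) → List (Option Int) → Option (List (Option Int))
  | [], dist => some dist
  | (nb, wt) :: rest, dist =>
    match PySem.List.pyGet? dist nb with
    | none => none
    | some dnb =>
      let nd := max du wt
      if ltO nd dnb then relaxB du rest (PySem.List.pySetD dist nb (some nd))
      else relaxB du rest dist

-- the `while True:` loop; each iteration returns or marks one more node visited,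
-- so fuel n+2 suffices (proved below)
def loopB (graph : List (Int × List (Int × Int))) (dest : Int) :
    Nat → List (Option Int) → List Bool → Option Int
  | 0, _, _ => none
  | fuel + 1, dist, vis =>
    match selB dist vis 0 none with
    | none => some (-1)
    | some (u, du) =>
      if (u : Int) = dest then some du
      else
        match adjFind graph (u : Int) with
        | none => none
        | some adjl =>
          match relaxB du adjl dist with
          | none => none
          | some dist' => loopB graph dest fuel dist' (vis.set u true)

def shortest_max_weight_alt (graph : List (Int × List (Int × Int))) (start : Int) (dest : Int) : Int :=
  if start = dest then 0
  else
    let n := graph.length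
    let dist := PySem.List.pySetD (List.replicate (n + 1) (none : Option Int)) start (some 0)
    (loopB graph dest (n + 2) dist (List.replicate (n + 1) false)).getD 0

-- ===== PRECONDITION & SPEC =====
-- reachability closure used by Pre_: nodes the search can put on the queue (dest is never
-- expanded: A returns at the pop of dest before reading its adjacency)
def expandR (graph : List (Int × List (Int × Int))) (dest : Int) (S : List Int) : List Int :=
  S ++ (graph.filter (fun p => decide (p.1 ∈ S) && decide (¬ p.1 = dest))).flatMap
    (fun p => p.2.map Prod.fst)

def reachN (graph : List (Int × List (Int × Int))) (start dest : Int) : Nat → List Int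
  | 0 => [start]
  | k + 1 => expandR graph dest (reachN graph start dest k)

def ReachR (graph : List (Int × List (Int × Int))) (start dest : Int) : List Int :=
  reachN graph start dest graph.length

-- Pre_ restricts to the natural domain of the function: either start == dest with start a valid
-- dist index (A returns 0 at the first pop without reading the graph), or start is a valid
-- nonnegative dist index and, unless start's adjacency list is empty (the search dies after one
-- visit), the
-- association list is a dict (distinct keys), start is a key, and every edge target of a key
-- the search can reach (the ReachR closure below, stated together with its saturation) is a
-- valid dist index that is again a key or dest.  Outside it A raises KeyError/IndexError, silently
-- aliases dist slots via negative-index wraparound, or the list is no dict; as a syntactic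
-- condition it also excludes some graphs whose offending node is unreachable, where A still
-- returns (see the cited examples).
def Pre_shortest_max_weight (graph : List (Int × List (Int × Int))) (start : Int) (dest : Int) : Prop :=
  (start = dest ∧ -((graph.length : Int) + 1) ≤ start ∧ start ≤ (graph.length : Int)) ∨
  (0 ≤ start ∧ start ≤ (graph.length : Int) ∧ (graph.map Prod.fst).Nodup ∧
    ((start, ([] : List (Int × Int))) ∈ graph ∨
     (start ∈ graph.map Prod.fst ∧
      (∀ x ∈ expandR graph dest (ReachR graph start dest), x ∈ ReachR graph start dest) ∧
      ∀ p ∈ graph, p.1 ∈ ReachR graph start dest → ∀ e ∈ p.2,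
        0 ≤ e.1 ∧ e.1 ≤ (graph.length : Int) ∧ (e.1 = dest ∨ e.1 ∈ graph.map Prod.fst))))
instance (graph : List (Int × List (Int × Int))) (start : Int) (dest : Int) :
    Decidable (Pre_shortest_max_weight graph start dest) := by
  unfold Pre_shortest_max_weight; infer_instance

def pvWitness_shortest_max_weight : (List (Int × List (Int × Int))) × Int × Int :=
  ([(0, [(1, 5)]), (1, [(0, 2)])], 0, 1)

def Spec_shortest_max_weight (graph : List (Int × List (Int × Int))) (start : Int) (dest : Int) (out : Int) : Prop := out = shortest_max_weight_alt graph start dest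
instance (graph : List (Int × List (Int × Int))) (start : Int) (dest : Int) (out : Int) : Decidable (Spec_shortest_max_weight graph start dest out) := by unfold Spec_shortest_max_weight; infer_instance

-- ===== CLAIM (what is proved, stated in full; the proofs are below) =====
def Claim_equal_shortest_max_weight : Prop := ∀ (graph : List (Int × List (Int × Int))) (start : Int) (dest : Int), Dom_shortest_max_weight graph start dest → Pre_shortest_max_weight graph start dest → Spec_shortest_max_weight graph start dest (shortest_max_weight graph start dest)

-- ===== LEMMAS AND PROOFS =====

-- the strong precondition the loop invariants run under: the non-degenerate branch of Pre_
structure PreStrong (graph : List (Int × List (Int × Int))) (start : Int) (dest : Int) : Prop where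
  nodup : (graph.map Prod.fst).Nodup
  h0st : 0 ≤ start
  hstle : start ≤ (graph.length : Int)
  hstkey : start = dest ∨ (adjFind graph start).isSome = true
  hclosed : ∀ x ∈ expandR graph dest (ReachR graph start dest), x ∈ ReachR graph start dest
  hedges : ∀ p ∈ graph, p.1 ∈ ReachR graph start dest → ∀ e ∈ p.2,
    0 ≤ e.1 ∧ e.1 ≤ (graph.length : Int) ∧ (e.1 = dest ∨ (adjFind graph e.1).isSome = true)

theorem adjFind_isSome_of_mem {g : List (Int × List (Int × Int))} {x : Int}
    (h : x ∈ g.map Prod.fst) : (adjFind g x).isSome = true := by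
  induction g with
  | nil => simp at h
  | cons p rest ih =>
    rw [adjFind]
    by_cases hk : p.1 = x
    · rw [if_pos hk]; rfl
    · rw [if_neg hk]
      rcases List.mem_map.mp h with ⟨q, hq, hqx⟩
      rcases List.mem_cons.mp hq with rfl | hq'
      · exact absurd hqx hk
      · exact ih (List.mem_map.mpr ⟨q, hq', hqx⟩)

-- ---------- walk semantics shared by both correctness proofs ----------

-- dist read with the guard both programs maintain (node ids 0..n); none = infinity
def dAt (dist : List (Option Int)) (v : Int) : Option Int :=
  if 0 ≤ v then dist.getD v.toNat none else none

def EdgeG (g : List (Int × List (Int × Int))) (u w v : Int) : Prop :=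
  ∃ l, adjFind g u = some l ∧ (v, w) ∈ l

def Steps (g : List (Int × List (Int × Int))) : Int → List (Int × Int) → Int → Prop
  | u, [], v => v = u
  | u, (w, x) :: rest, v => EdgeG g u w x ∧ Steps g x rest v

def wval (d0 : Int) (s : List (Int × Int)) : Int := s.foldl (fun d p => max d p.1) d0

-- "there is a walk from start to v whose value (taken from initial 0) is d"
def RV (g : List (Int × List (Int × Int))) (st v d : Int) : Prop :=
  ∃ s, Steps g st s v ∧ wval 0 s = d

-- what A returns and what B returns: the least reachable value, or -1
def IsAns (g : List (Int × List (Int × Int))) (st dst r : Int) : Prop :=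
  (RV g st dst r ∧ ∀ d, RV g st dst d → r ≤ d) ∨ ((¬ ∃ d, RV g st dst d) ∧ r = -1)

def okNode (g : List (Int × List (Int × Int))) (dst x : Int) : Prop :=
  0 ≤ x ∧ x ≤ (g.length : Int) ∧ (x = dst ∨ (adjFind g x).isSome = true)

-- finite set of values dist entries can take: 0 and the edge weights
def valS (g : List (Int × List (Int × Int))) : Finset Int :=
  insert 0 ((g.flatMap (fun p => p.2.map Prod.snd)).toFinset)

-- ---------- small facts ----------

theorem adjFind_mem {g : List (Int × List (Int × Int))} {u : Int} {l : List (Int × Int)}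
    (h : adjFind g u = some l) : (u, l) ∈ g := by
  induction g with
  | nil => simp [adjFind] at h
  | cons p rest ih =>
    rw [adjFind] at h
    by_cases hk : p.1 = u
    · rw [if_pos hk] at h
      cases h
      cases p
      simp only at hk
      subst hk
      exact List.mem_cons_self
    · rw [if_neg hk] at h
      exact List.mem_cons_of_mem _ (ih h)

theorem le_wval (d0 : Int) (s : List (Int × Int)) : d0 ≤ wval d0 s := by
  induction s generalizing d0 with
  | nil => simp [wval]
  | cons p t ih => exact le_trans (le_max_left d0 p.1) (ih (max d0 p.1))

theorem wval_cons (d0 : Int) (w x : Int) (t : List (Int × Int)) :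
    wval d0 ((w, x) :: t) = wval (max d0 w) t := rfl

theorem Steps_snoc {g : List (Int × List (Int × Int))} {x u v w : Int} {s : List (Int × Int)}
    (hs : Steps g x s u) (he : EdgeG g u w v) : Steps g x (s ++ [(w, v)]) v := by
  induction s generalizing x with
  | nil => cases hs; exact ⟨he, rfl⟩
  | cons p t ih =>
    obtain ⟨h1, h2⟩ := hs
    exact ⟨h1, ih h2⟩

theorem RV_start (g : List (Int × List (Int × Int))) (st : Int) : RV g st st 0 :=
  ⟨[], rfl, rfl⟩

theorem RV_step {g : List (Int × List (Int × Int))} {st u w v d : Int}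
    (h : RV g st u d) (he : EdgeG g u w v) : RV g st v (max d w) := by
  obtain ⟨s, hs, hv⟩ := h
  refine ⟨s ++ [(w, v)], Steps_snoc hs he, ?_⟩
  simp [wval, List.foldl_append]
  rw [show s.foldl (fun d p => max d p.1) 0 = wval 0 s from rfl, hv]

theorem RV_nonneg {g : List (Int × List (Int × Int))} {st v d : Int} (h : RV g st v d) :
    0 ≤ d := by
  obtain ⟨s, _, hv⟩ := h
  subst hv; exact le_wval 0 s

theorem zero_mem_valS (g : List (Int × List (Int × Int))) : (0 : Int) ∈ valS g := by
  simp [valS]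

theorem wt_mem_valS {g : List (Int × List (Int × Int))} {u w v : Int}
    (he : EdgeG g u w v) : w ∈ valS g := by
  obtain ⟨l, hf, hm⟩ := he
  simp only [valS, Finset.mem_insert, List.mem_toFinset, List.mem_flatMap]
  right
  exact ⟨(u, l), adjFind_mem hf, by simpa using ⟨v, hm⟩⟩

theorem max_mem_valS {g : List (Int × List (Int × Int))} {a b : Int}
    (ha : a ∈ valS g) (hb : b ∈ valS g) : max a b ∈ valS g := by
  rcases max_choice a b with h | h <;> rw [h] <;> assumption

theorem IsAns_unique {g : List (Int × List (Int × Int))} {st dst r r' : Int}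
    (h1 : IsAns g st dst r) (h2 : IsAns g st dst r') : r = r' := by
  rcases h1 with ⟨hr, hmin⟩ | ⟨hno, he⟩ <;> rcases h2 with ⟨hr', hmin'⟩ | ⟨hno', he'⟩
  · exact le_antisymm (hmin r' hr') (hmin' r hr)
  · exact absurd ⟨r, hr⟩ hno'
  · exact absurd ⟨r', hr'⟩ hno
  · rw [he, he']

-- ---------- dAt / lists ----------

theorem dAt_some_lt {dist : List (Option Int)} {v dv : Int} (h : dAt dist v = some dv) :
    0 ≤ v ∧ v.toNat < dist.length := by
  by_cases h0 : 0 ≤ v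
  · refine ⟨h0, ?_⟩
    by_contra hlen
    push_neg at hlen
    simp [dAt, h0, List.getD_eq_getElem?_getD, List.getElem?_eq_none (by omega)] at h
  · simp [dAt, h0] at h

theorem pyGet?_dAt {dist : List (Option Int)} {v : Int} (h0 : 0 ≤ v)
    (h1 : v.toNat < dist.length) : PySem.List.pyGet? dist v = some (dAt dist v) := by
  rw [PySem.List.pyGet?_of_nonneg _ h0]
  unfold dAt
  rw [if_pos h0, List.getD_eq_getElem?_getD, List.getElem?_eq_getElem h1]
  rfl

theorem pySetD_toSet {dist : List (Option Int)} {v : Int} (h0 : 0 ≤ v) (o : Option Int) :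
    PySem.List.pySetD dist v o = dist.set v.toNat o :=
  PySem.List.pySetD_of_nonneg _ o h0

theorem dAt_set_self {dist : List (Option Int)} {v : Int} (h0 : 0 ≤ v)
    (h1 : v.toNat < dist.length) (o : Option Int) : dAt (dist.set v.toNat o) v = o := by
  simp [dAt, h0, List.getD_eq_getElem?_getD, List.getElem?_set, h1]

theorem dAt_set_ne {dist : List (Option Int)} {v : Int} {j : Nat} (hne : v.toNat ≠ j ∨ ¬ 0 ≤ v)
    (o : Option Int) : dAt (dist.set j o) v = dAt dist v := by
  rcases hne with hne | hne
  · by_cases h0 : 0 ≤ v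
    · simp [dAt, h0, List.getD_eq_getElem?_getD, List.getElem?_set_ne (by omega : j ≠ v.toNat)]
    · simp [dAt, h0]
  · simp [dAt, hne]


theorem dAt_update {dist : List (Option Int)} {nb : Int} (h0 : 0 ≤ nb)
    (h1 : nb.toNat < dist.length) (o : Option Int) (v : Int) :
    dAt (dist.set nb.toNat o) v = if v = nb then o else dAt dist v := by
  by_cases hv : v = nb
  · subst hv; rw [if_pos rfl]; exact dAt_set_self h0 h1 o
  · rw [if_neg hv]
    by_cases hv0 : 0 ≤ v
    · exact dAt_set_ne (Or.inl (by omega)) o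
    · exact dAt_set_ne (Or.inr hv0) o

theorem mem_expandR_left {g : List (Int × List (Int × Int))} {dst x : Int} {S : List Int}
    (h : x ∈ S) : x ∈ expandR g dst S := by
  simp [expandR, h]

theorem st_mem_ReachR (g : List (Int × List (Int × Int))) (st dst : Int) :
    st ∈ ReachR g st dst := by
  unfold ReachR
  induction g.length with
  | zero => simp [reachN]
  | succ k ih => exact mem_expandR_left ih

theorem mem_expandR_step {g : List (Int × List (Int × Int))} {dst u v w : Int} {S : List Int}
    {l : List (Int × Int)} (hg : (u, l) ∈ g) (hu : u ∈ S) (hune : ¬ u = dst)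
    (hm : (v, w) ∈ l) : v ∈ expandR g dst S := by
  simp only [expandR, List.mem_append, List.mem_flatMap, List.mem_filter, List.mem_map]
  exact Or.inr ⟨(u, l), ⟨hg, by simp [hu, hune]⟩, (v, w), hm, rfl⟩

theorem edge_okR {g : List (Int × List (Int × Int))} {st dst : Int}
    (hPre : PreStrong g st dst) {u w v : Int} (huR : u ∈ ReachR g st dst)
    (hune : ¬ u = dst) (he : EdgeG g u w v) :
    okNode g dst v ∧ v ∈ ReachR g st dst := by
  obtain ⟨l, hf, hm⟩ := he
  have hg := adjFind_mem hf
  refine ⟨hPre.hedges (u, l) hg huR (v, w) hm, ?_⟩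
  exact hPre.hclosed v (mem_expandR_step hg huR hune hm)

theorem okNode_adjFind {g : List (Int × List (Int × Int))} {dst x : Int}
    (h : okNode g dst x) (hne : x ≠ dst) : ∃ l, adjFind g x = some l := by
  rcases h.2.2 with h' | h'
  · exact absurd h' hne
  · exact Option.isSome_iff_exists.mp h'

theorem okNode_lt {g : List (Int × List (Int × Int))} {dst x : Int} (h : okNode g dst x) :
    x.toNat < g.length + 1 := by
  obtain ⟨h1, h2, _⟩ := h; omega

-- ===== the measure for A's loop =====

def rankV (g : List (Int × List (Int × Int))) : Option Int → Nat
  | none => (valS g).card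
  | some x => ((valS g).filter (· < x)).card

def phi (g : List (Int × List (Int × Int))) (dist : List (Option Int)) : Nat :=
  (dist.map (rankV g)).sum

theorem rankV_le (g : List (Int × List (Int × Int))) (o : Option Int) :
    rankV g o ≤ (valS g).card := by
  cases o with
  | none => simp [rankV]
  | some x => exact Finset.card_le_card (Finset.filter_subset _ _)

theorem rankV_lt {g : List (Int × List (Int × Int))} {nd : Int} {old : Option Int}
    (hmem : nd ∈ valS g) (hlt : ltO nd old = true) : rankV g (some nd) < rankV g old := by
  cases old with
  | none =>
    refine Finset.card_lt_card ?_
    constructor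
    · exact Finset.filter_subset _ _
    · intro hsub
      have := hsub hmem
      simp at this
  | some x =>
    simp only [ltO, decide_eq_true_eq] at hlt
    refine Finset.card_lt_card ?_
    constructor
    · intro a ha
      simp only [Finset.mem_filter] at ha ⊢
      exact ⟨ha.1, lt_trans ha.2 hlt⟩
    · intro hsub
      have : nd ∈ (valS g).filter (· < nd) := hsub (by simp [Finset.mem_filter, hmem, hlt])
      simp at this

theorem phi_set {g : List (Int × List (Int × Int))} {dist : List (Option Int)} {j : Nat}
    (h : j < dist.length) (o : Option Int) :
    phi g (dist.set j o) + rankV g (dist.getD j none) = phi g dist + rankV g o := by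
  induction dist generalizing j with
  | nil => simp at h
  | cons a l ih =>
    cases j with
    | zero => simp [phi, List.getD]; omega
    | succ k =>
      have hk : k < l.length := by simpa using h
      have := ih hk
      simp only [List.set, phi, List.map, List.sum_cons, List.getD_cons_succ] at *
      omega

theorem phi_le (g : List (Int × List (Int × Int))) (dist : List (Option Int)) :
    phi g dist ≤ dist.length * (valS g).card := by
  induction dist with
  | nil => simp [phi]
  | cons a l ih =>
    have := rankV_le g a
    simp only [phi, List.map, List.sum_cons, List.length_cons] at *
    calc rankV g a + (l.map (rankV g)).sum ≤ (valS g).card + l.length * (valS g).card := by omega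
    _ = (l.length + 1) * (valS g).card := by ring

theorem card_valS_le (g : List (Int × List (Int × Int))) :
    (valS g).card ≤ (g.flatMap (fun p => p.2)).length + 1 := by
  have h1 : (valS g).card ≤ ((g.flatMap (fun p => p.2.map Prod.snd)).toFinset).card + 1 :=
    Finset.card_insert_le _ _
  have h2 : ((g.flatMap (fun p => p.2.map Prod.snd)).toFinset).card
      ≤ (g.flatMap (fun p => p.2.map Prod.snd)).length := List.toFinset_card_le _
  have h3 : (g.flatMap (fun p => p.2.map Prod.snd)).length = (g.flatMap (fun p => p.2)).length := by
    simp [List.length_flatMap]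
  omega

-- ===== pqMinA ====

theorem pqMinA_spec {pq : List (Int × Int)} (h : pq ≠ []) :
    ∃ m, pqMinA pq = some m ∧ m ∈ pq ∧ ∀ x ∈ pq, m.1 ≤ x.1 := by
  induction pq with
  | nil => exact absurd rfl h
  | cons p rest ih =>
    cases rest with
    | nil =>
      exact ⟨p, by simp [pqMinA], by simp, by intro x hx; simp at hx; simp [hx]⟩
    | cons q t =>
      obtain ⟨m, hm, hmem, hmin⟩ := ih (by simp)
      rw [pqMinA, hm]
      by_cases hc : m.1 < p.1 ∨ (m.1 = p.1 ∧ m.2 < p.2)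
      · refine ⟨m, by simp [hc], by right; exact hmem, ?_⟩
        intro x hx
        rcases List.mem_cons.mp hx with rfl | hx
        · rcases hc with hc | ⟨hc, _⟩; exact le_of_lt hc; exact le_of_eq hc
        · exact hmin x hx
      · refine ⟨p, by simp [hc], List.mem_cons_self, ?_⟩
        intro x hx
        rcases List.mem_cons.mp hx with rfl | hx
        · exact le_refl _
        · have h1 := hmin x hx
          rw [not_or, not_and_or] at hc
          have h2 : ¬ m.1 < p.1 := hc.1
          omega

-- ===== A's invariant =====

def InvA (g : List (Int × List (Int × Int))) (st dst : Int) (P : Int → Prop) (l : Int)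
    (dist : List (Option Int)) (pq : List (Int × Int)) : Prop :=
  dist.length = g.length + 1 ∧
  (∀ e ∈ pq, l ≤ e.1 ∧ (∃ dx, dAt dist e.2 = some dx ∧ dx ≤ e.1) ∧ RV g st e.2 e.1 ∧
    e.1 ∈ valS g ∧ okNode g dst e.2 ∧ e.2 ∈ ReachR g st dst) ∧
  (∀ v dv, 0 ≤ v → dAt dist v = some dv → RV g st v dv ∧ dv ∈ valS g) ∧
  (∀ v, 0 ≤ v → ¬ P v → ∀ dv, dAt dist v = some dv → (dv, v) ∈ pq) ∧
  (∀ y, P y → ∃ dy, dAt dist y = some dy ∧ dy ≤ l ∧ y ∈ ReachR g st dst ∧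
    ∀ w z, EdgeG g y w z → ∃ dz, dAt dist z = some dz ∧ dz ≤ max dy w) ∧
  (¬ P dst) ∧
  (∃ ds, dAt dist st = some ds ∧ ds ≤ 0)

-- the "chase" argument: follow a walk through processed nodes until it leaves them
theorem chaseA {g : List (Int × List (Int × Int))} {st dst : Int} {P : Int → Prop} {l : Int}
    {dist : List (Option Int)} {pq : List (Int × Int)}
    (hPre : PreStrong g st dst) (hInv : InvA g st dst P l dist pq) :
    ∀ (s : List (Int × Int)) (x v dx d0 : Int), Steps g x s v → 0 ≤ x →
      dAt dist x = some dx → dx ≤ d0 →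
      (∃ e ∈ pq, e.1 ≤ wval d0 s) ∨ (P v ∧ ∃ dv, dAt dist v = some dv ∧ dv ≤ wval d0 s) := by
  intro s
  induction s with
  | nil =>
    intro x v dx d0 hsteps hx0 hdx hle
    have hvx : v = x := hsteps
    subst hvx
    by_cases hP : P v
    · exact Or.inr ⟨hP, dx, hdx, hle⟩
    · exact Or.inl ⟨(dx, v), hInv.2.2.2.1 v hx0 hP dx hdx, hle⟩
  | cons p t ih =>
    intro x v dx d0 hsteps hx0 hdx hle
    obtain ⟨w, y⟩ := p
    obtain ⟨hedge, hrest⟩ := hsteps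
    by_cases hP : P x
    · obtain ⟨dy, hdy, _, hxR, hEdges⟩ := hInv.2.2.2.2.1 x hP
      have hxne : ¬ x = dst := fun h => hInv.2.2.2.2.2.1 (h ▸ hP)
      rw [hdx] at hdy
      obtain rfl : dx = dy := Option.some.inj hdy
      obtain ⟨dz, hdz, hdzle⟩ := hEdges w y hedge
      have hy0 : 0 ≤ y := (edge_okR hPre hxR hxne hedge).1.1
      have hstep : dz ≤ max d0 w :=
        le_trans hdzle (max_le_max hle (le_refl w))
      have := ih y v dz (max d0 w) hrest hy0 hdz hstep
      rw [wval_cons]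
      exact this
    · refine Or.inl ⟨(dx, x), hInv.2.2.2.1 x hx0 hP dx hdx, ?_⟩
      exact le_trans hle (le_wval d0 _)

-- ===== relaxA specification =====

theorem relaxA_spec {g : List (Int × List (Int × Int))} {st dst node d : Int}
    (hd : d ∈ valS g) (hRVd : RV g st node d) :
    ∀ (adjl : List (Int × Int)) (dist : List (Option Int)) (pq : List (Int × Int)),
    dist.length = g.length + 1 →
    (∀ e ∈ adjl, okNode g dst e.1) →
    (∀ nb wt, (nb, wt) ∈ adjl → EdgeG g node wt nb) →
    ∃ dist' pq', relaxA d adjl dist pq = some (dist', pq') ∧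
      dist'.length = g.length + 1 ∧
      (∀ v dv', dAt dist' v = some dv' → dAt dist v = some dv' ∨
        (∃ w, EdgeG g node w v ∧ dv' = max d w ∧ okNode g dst v)) ∧
      (∀ v dv', dAt dist' v = some dv' → ∀ dv, dAt dist v = some dv → dv' ≤ dv) ∧
      (∀ e ∈ pq', e ∈ pq ∨ ((∃ dx, dAt dist' e.2 = some dx ∧ dx ≤ e.1) ∧ e.1 ∈ valS g ∧
        d ≤ e.1 ∧ RV g st e.2 e.1 ∧ okNode g dst e.2 ∧ ∃ w, EdgeG g node w e.2)) ∧
      (∀ e ∈ pq, e ∈ pq') ∧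
      (∀ nb wt, (nb, wt) ∈ adjl → ∃ dz, dAt dist' nb = some dz ∧ dz ≤ max d wt) ∧
      (∀ v, 0 ≤ v → (∀ dv, dAt dist v = some dv → (dv, v) ∈ pq) →
        ∀ dv', dAt dist' v = some dv' → (dv', v) ∈ pq') ∧
      (∀ v dv, dAt dist v = some dv → dv ≤ d → dAt dist' v = dAt dist v) ∧
      (∀ v, dAt dist' v = none → dAt dist v = none) ∧
      2 * phi g dist' + pq'.length ≤ 2 * phi g dist + pq.length := by
  intro adjl
  induction adjl with
  | nil =>
    intro dist pq hlen hok hedge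
    refine ⟨dist, pq, rfl, hlen, fun v dv' h => Or.inl h, ?_, fun e he => Or.inl he,
      fun e he => he, fun nb wt h => by simp at h, fun v _ H dv' h => H dv' h,
      fun v dv h _ => rfl, fun v h => h, le_refl _⟩
    intro v dv' h dv h2
    rw [h] at h2
    injection h2 with h3
    omega
  | cons e rest ih =>
    obtain ⟨nb, wt⟩ := e
    intro dist pq hlen hok hedge
    have hoknb : okNode g dst nb := hok (nb, wt) List.mem_cons_self
    have h0nb : 0 ≤ nb := hoknb.1
    have hlt : nb.toNat < dist.length := by rw [hlen]; exact okNode_lt hoknb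
    have hok' : ∀ e ∈ rest, okNode g dst e.1 := fun e he => hok e (List.mem_cons_of_mem _ he)
    have hedge' : ∀ nb' wt', (nb', wt') ∈ rest → EdgeG g node wt' nb' :=
      fun nb' wt' he => hedge nb' wt' (List.mem_cons_of_mem _ he)
    have hEhead : EdgeG g node wt nb := hedge nb wt List.mem_cons_self
    cases hup : ltO (max d wt) (dAt dist nb) with
    | true =>
      have hndS : max d wt ∈ valS g := max_mem_valS hd (wt_mem_valS hEhead)
      have hstep : ∀ v, dAt (dist.set nb.toNat (some (max d wt))) v =
          if v = nb then some (max d wt) else dAt dist v := dAt_update h0nb hlt _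
      obtain ⟨dist', pq', hrel, hlen', P1, P2, P6, P7, P3, P8, P4, P5, PM⟩ :=
        ih (dist.set nb.toNat (some (max d wt))) (pq ++ [(max d wt, nb)])
          (by simpa using hlen) hok' hedge'
      have hnbsome : dAt (dist.set nb.toNat (some (max d wt))) nb = some (max d wt) := by
        rw [hstep]; simp
      have hlow : ∀ x, dAt dist nb = some x → max d wt < x := by
        intro x hx
        rw [hx] at hup
        simpa [ltO] using hup
      have hfin : ∃ dz, dAt dist' nb = some dz ∧ dz ≤ max d wt := by
        cases hdz : dAt dist' nb with
        | none => exact absurd (P5 nb hdz) (by rw [hnbsome]; simp)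
        | some dz => exact ⟨dz, rfl, P2 nb dz hdz _ hnbsome⟩
      refine ⟨dist', pq', ?_, hlen', ?_, ?_, ?_, ?_, ?_, ?_, ?_, ?_, ?_⟩
      · simp only [relaxA, pyGet?_dAt h0nb hlt, pySetD_toSet h0nb, hup, if_true]
        exact hrel
      · intro v dv' h
        rcases P1 v dv' h with h1 | h1
        · rw [hstep] at h1
          by_cases hv : v = nb
          · rw [if_pos hv] at h1
            injection h1 with h1
            exact Or.inr ⟨wt, hv ▸ hEhead, h1.symm, hv ▸ hoknb⟩
          · rw [if_neg hv] at h1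
            exact Or.inl h1
        · exact Or.inr h1
      · intro v dv' h dv h2
        by_cases hv : v = nb
        · subst hv
          have := P2 v dv' h _ hnbsome
          have := hlow dv h2
          omega
        · exact P2 v dv' h dv (by rw [hstep, if_neg hv]; exact h2)
      · intro e he
        rcases P6 e he with h1 | h1
        · rcases List.mem_append.mp h1 with h2 | h2
          · exact Or.inl h2
          · simp only [List.mem_singleton] at h2
            subst h2
            obtain ⟨dz, hdz, hdzle⟩ := hfin
            exact Or.inr ⟨⟨dz, hdz, hdzle⟩, hndS, le_max_left _ _,
              RV_step hRVd hEhead, hoknb, wt, hEhead⟩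
        · exact Or.inr h1
      · intro e he
        exact P7 e (List.mem_append_left _ he)
      · intro nb' wt' hmem
        rcases List.mem_cons.mp hmem with heq | hmem'
        · obtain ⟨dz, hdz, hdzle⟩ := hfin
          injection heq with he1 he2
          rw [he1, he2]
          exact ⟨dz, hdz, hdzle⟩
        · exact P3 nb' wt' hmem'
      · intro v hv0 Hold dv' hdv'
        refine P8 v hv0 ?_ dv' hdv'
        intro dv hdv1
        rw [hstep] at hdv1
        by_cases hv : v = nb
        · rw [if_pos hv] at hdv1
          injection hdv1 with h1
          subst hv
          rw [← h1]
          exact List.mem_append_right _ List.mem_cons_self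
        · rw [if_neg hv] at hdv1
          exact List.mem_append_left _ (Hold dv hdv1)
      · intro v dv h hle
        by_cases hv : v = nb
        · subst hv
          exact absurd (hlow dv h) (not_lt.mpr (le_trans hle (le_max_left d wt)))
        · rw [P4 v dv (by rw [hstep, if_neg hv]; exact h) hle, hstep, if_neg hv]
      · intro v h
        have := P5 v h
        rw [hstep] at this
        by_cases hv : v = nb
        · rw [if_pos hv] at this; exact absurd this (Option.some_ne_none _)
        · rw [if_neg hv] at this; exact this
      · have hphi := phi_set (g := g) hlt (some (max d wt))
        have hgd : dist.getD nb.toNat none = dAt dist nb := by simp [dAt, h0nb]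
        rw [hgd] at hphi
        have hrank : rankV g (some (max d wt)) < rankV g (dAt dist nb) := rankV_lt hndS hup
        have hlenapp : (pq ++ [(max d wt, nb)]).length = pq.length + 1 := by simp
        omega
    | false =>
      obtain ⟨dist', pq', hrel, hlen', P1, P2, P6, P7, P3, P8, P4, P5, PM⟩ :=
        ih dist pq hlen hok' hedge'
      have hx : ∃ x, dAt dist nb = some x ∧ x ≤ max d wt := by
        cases hdd : dAt dist nb with
        | none => rw [hdd] at hup; simp [ltO] at hup
        | some x =>
          rw [hdd] at hup
          refine ⟨x, rfl, ?_⟩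
          simp [ltO] at hup
          omega
      refine ⟨dist', pq', ?_, hlen', P1, P2, P6, P7, ?_, P8, P4, P5, PM⟩
      · simp only [relaxA, pyGet?_dAt h0nb hlt, hup, Bool.false_eq_true, if_false]
        exact hrel
      · intro nb' wt' hmem
        rcases List.mem_cons.mp hmem with heq | hmem'
        · obtain ⟨x, hxx, hxle⟩ := hx
          injection heq with he1 he2
          rw [he1, he2]
          cases hdz : dAt dist' nb with
          | none => exact absurd (P5 nb hdz) (by rw [hxx]; simp)
          | some dz => exact ⟨dz, rfl, le_trans (P2 nb dz hdz x hxx) hxle⟩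
        · exact P3 nb' wt' hmem'


-- ===== A's main loop lemma =====

theorem emptyAnsA {g : List (Int × List (Int × Int))} {st dst : Int}
    (hPre : PreStrong g st dst) {P : Int → Prop} {l : Int}
    {dist : List (Option Int)} (hInv : InvA g st dst P l dist []) : IsAns g st dst (-1) := by
  right
  refine ⟨?_, rfl⟩
  rintro ⟨dd, s, hs, hv⟩
  obtain ⟨ds, hds, hds0⟩ := hInv.2.2.2.2.2.2
  rcases chaseA hPre hInv s st dst ds 0 hs hPre.h0st hds hds0 with ⟨e, he, _⟩ | ⟨hP, _⟩
  · simp at he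
  · exact hInv.2.2.2.2.2.1 hP

theorem loopA_correct {g : List (Int × List (Int × Int))} {st dst : Int}
    (hPre : PreStrong g st dst) :
    ∀ (fuel : Nat) (dist : List (Option Int)) (pq : List (Int × Int)) (P : Int → Prop) (l : Int),
    InvA g st dst P l dist pq → 2 * phi g dist + pq.length < fuel →
    ∃ r, loopA g dst fuel dist pq = some r ∧ IsAns g st dst r := by
  intro fuel
  induction fuel with
  | zero =>
    intro dist pq P l hInv hM
    exact absurd hM (Nat.not_lt_zero _)
  | succ f ihf =>
    intro dist pq P l hInv hM
    cases pq with
    | nil => exact ⟨-1, by simp only [loopA], emptyAnsA hPre hInv⟩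
    | cons a tl =>
      obtain ⟨m, hm, hmem, hmin⟩ := pqMinA_spec (pq := a :: tl) (by simp)
      obtain ⟨d, node⟩ := m
      have H1 := hInv.2.1 (d, node) hmem
      obtain ⟨hld, ⟨dnode, hdnode, hdnodele⟩, hRVnode, hdS, hoknode, hnodeR⟩ := H1
      have h0node : 0 ≤ node := hoknode.1
      have hd0 : 0 ≤ d := RV_nonneg hRVnode
      by_cases hdest : node = dst
      · refine ⟨d, ?_, ?_⟩
        · simp only [loopA, hm, if_pos hdest]
        · left
          refine ⟨hdest ▸ hRVnode, ?_⟩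
          rintro d' ⟨s, hs, hv⟩
          obtain ⟨ds, hds, hds0⟩ := hInv.2.2.2.2.2.2
          rcases chaseA hPre hInv s st dst ds 0 hs hPre.h0st hds hds0 with ⟨e, he, hle⟩ | ⟨hP, _⟩
          · rw [hv] at hle
            exact le_trans (hmin e he) hle
          · exact absurd hP hInv.2.2.2.2.2.1
      · obtain ⟨adjl, hadj⟩ := okNode_adjFind hoknode hdest
        have hmemg : (node, adjl) ∈ g := adjFind_mem hadj
        have hokedges : ∀ e ∈ adjl, okNode g dst e.1 := fun e he => hPre.hedges (node, adjl) hmemg hnodeR e he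
        have hedges : ∀ nb wt, (nb, wt) ∈ adjl → EdgeG g node wt nb :=
          fun nb wt h => ⟨adjl, hadj, h⟩
        obtain ⟨hlen, H1all, H2, H3, H4, H6, H8⟩ := hInv
        obtain ⟨dist', pq', hrel, hlen', P1, P2, P6, P7, P3, P8, P4, P5, PM⟩ :=
          relaxA_spec hdS hRVnode adjl dist ((a :: tl).erase (d, node)) hlen hokedges hedges
        have hsomeKeep : ∀ v dv, dAt dist v = some dv → ∃ dv', dAt dist' v = some dv' ∧ dv' ≤ dv := by
          intro v dv hdv
          cases hdd : dAt dist' v with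
          | none => exact absurd (P5 v hdd) (by rw [hdv]; simp)
          | some dv' => exact ⟨dv', rfl, P2 v dv' hdd dv hdv⟩
        -- re-establish the invariant for the recursive call
        have hInv' : InvA g st dst (fun v => P v ∨ v = node) d dist' pq' := by
          refine ⟨hlen', ?_, ?_, ?_, ?_, ?_, ?_⟩
          · intro e he
            rcases P6 e he with h1 | h1
            · have hein := List.mem_of_mem_erase h1
              obtain ⟨he1, ⟨dx, hdx, hdxle⟩, he3, he4, he5, he6⟩ := H1all e hein
              obtain ⟨dx', hdx', hdx'le⟩ := hsomeKeep e.2 dx hdx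
              exact ⟨hmin e hein, ⟨dx', hdx', le_trans hdx'le hdxle⟩, he3, he4, he5, he6⟩
            · obtain ⟨h1, h2, h3, h4, h5, w, hw⟩ := h1
              exact ⟨h3, h1, h4, h2, h5, (edge_okR hPre hnodeR hdest hw).2⟩
          · intro v dv hv0 hdv
            rcases P1 v dv hdv with h1 | h1
            · exact H2 v dv hv0 h1
            · obtain ⟨w, hew, hdvw, hokv⟩ := h1
              subst hdvw
              exact ⟨RV_step hRVnode hew, max_mem_valS hdS (wt_mem_valS hew)⟩
          · intro v hv0 hPv dv' hdv'
            rw [not_or] at hPv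
            refine P8 v hv0 ?_ dv' hdv'
            intro dv hdv
            refine (List.mem_erase_of_ne ?_).mpr (H3 v hv0 hPv.1 dv hdv)
            intro hEq
            exact hPv.2 (congrArg Prod.snd hEq)
          · intro y hPy
            rcases hPy with hPy | hPy
            · obtain ⟨dy, hdy, hdyl, hyR, hedges0⟩ := H4 y hPy
              have hstay : dAt dist' y = some dy := by
                rw [P4 y dy hdy (le_trans hdyl hld)]; exact hdy
              refine ⟨dy, hstay, le_trans hdyl hld, hyR, ?_⟩
              intro w z hez
              obtain ⟨dz, hdz, hdzle⟩ := hedges0 w z hez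
              obtain ⟨dz', hdz', hdz'le⟩ := hsomeKeep z dz hdz
              exact ⟨dz', hdz', le_trans hdz'le hdzle⟩
            · subst hPy
              by_cases hPn : P y
              · obtain ⟨dy, hdy, hdyl, hyR, hedges0⟩ := H4 y hPn
                have hstay : dAt dist' y = some dy := by
                  rw [P4 y dy hdy (le_trans hdyl hld)]; exact hdy
                refine ⟨dy, hstay, le_trans hdyl hld, hyR, ?_⟩
                intro w z hez
                obtain ⟨dz, hdz, hdzle⟩ := hedges0 w z hez
                obtain ⟨dz', hdz', hdz'le⟩ := hsomeKeep z dz hdz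
                exact ⟨dz', hdz', le_trans hdz'le hdzle⟩
              · -- first pop of y: its dist value equals d
                have hind : (dnode, y) ∈ a :: tl := H3 y h0node hPn dnode hdnode
                have hdled : d ≤ dnode := hmin (dnode, y) hind
                have hdeq : dnode = d := le_antisymm hdnodele hdled
                subst hdeq
                have hstay : dAt dist' y = some dnode := by
                  rw [P4 y dnode hdnode (le_refl _)]; exact hdnode
                refine ⟨dnode, hstay, le_refl _, hnodeR, ?_⟩
                intro w z hez
                obtain ⟨l', hadj', hz⟩ := hez
                rw [hadj] at hadj'
                injection hadj' with hl'
                subst hl'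
                exact P3 z w hz
          · rw [not_or]
            exact ⟨H6, fun h => hdest h.symm⟩
          · obtain ⟨ds, hds, hds0⟩ := H8
            refine ⟨ds, ?_, hds0⟩
            rw [P4 st ds hds (le_trans hds0 hd0)]
            exact hds
        have hMrest : ((a :: tl).erase (d, node)).length = tl.length := by
          rw [List.length_erase_of_mem hmem]
          simp
        have hM' : 2 * phi g dist' + pq'.length < f := by
          rw [hMrest] at PM
          simp only [List.length_cons] at hM
          omega
        obtain ⟨r, hloop, hAns⟩ := ihf dist' pq' _ d hInv' hM'
        refine ⟨r, ?_, hAns⟩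
        simp only [loopA, hm, if_neg hdest, hadj, hrel]
        exact hloop

-- ===== B's invariant =====

def visAt (vis : List Bool) (v : Int) : Bool :=
  if 0 ≤ v then vis.getD v.toNat false else false

def InvB (g : List (Int × List (Int × Int))) (st dst : Int)
    (dist : List (Option Int)) (vis : List Bool) : Prop :=
  dist.length = g.length + 1 ∧ vis.length = g.length + 1 ∧
  (∀ v dv, 0 ≤ v → dAt dist v = some dv → RV g st v dv ∧ okNode g dst v ∧ v ∈ ReachR g st dst) ∧
  (∀ y, 0 ≤ y → visAt vis y = true → ∃ dy, dAt dist y = some dy ∧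
    (∀ w z, EdgeG g y w z → ∃ dz, dAt dist z = some dz ∧ dz ≤ max dy w) ∧
    (∀ z dz, 0 ≤ z → visAt vis z = false → dAt dist z = some dz → dy ≤ dz)) ∧
  (visAt vis dst = false) ∧
  (∃ ds, dAt dist st = some ds ∧ ds ≤ 0)

theorem chaseB {g : List (Int × List (Int × Int))} {st dst : Int}
    {dist : List (Option Int)} {vis : List Bool}
    (hPre : PreStrong g st dst) (hInv : InvB g st dst dist vis) :
    ∀ (s : List (Int × Int)) (x v dx d0 : Int), Steps g x s v → 0 ≤ x →
      dAt dist x = some dx → dx ≤ d0 →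
      (∃ y dy, 0 ≤ y ∧ visAt vis y = false ∧ dAt dist y = some dy ∧ dy ≤ wval d0 s) ∨
      (visAt vis v = true ∧ ∃ dv, dAt dist v = some dv ∧ dv ≤ wval d0 s) := by
  intro s
  induction s with
  | nil =>
    intro x v dx d0 hsteps hx0 hdx hle
    have hvx : v = x := hsteps
    subst hvx
    cases hvis : visAt vis v with
    | true => exact Or.inr ⟨by simp [hvis], dx, hdx, hle⟩
    | false => exact Or.inl ⟨v, dx, hx0, hvis, hdx, hle⟩
  | cons p t ih =>
    intro x v dx d0 hsteps hx0 hdx hle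
    obtain ⟨w, y⟩ := p
    obtain ⟨hedge, hrest⟩ := hsteps
    cases hvis : visAt vis x with
    | false => exact Or.inl ⟨x, dx, hx0, hvis, hdx, le_trans hle (le_wval d0 _)⟩
    | true =>
      obtain ⟨dy, hdy, hEdges, _⟩ := hInv.2.2.2.1 x hx0 hvis
      have hxR : x ∈ ReachR g st dst := (hInv.2.2.1 x dy hx0 hdy).2.2
      have hxne : ¬ x = dst := fun h => by rw [h, hInv.2.2.2.2.1] at hvis; exact Bool.noConfusion hvis
      rw [hdx] at hdy
      obtain rfl : dx = dy := Option.some.inj hdy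
      obtain ⟨dz, hdz, hdzle⟩ := hEdges w y hedge
      have hy0 : 0 ≤ y := (edge_okR hPre hxR hxne hedge).1.1
      have hstep : dz ≤ max d0 w :=
        le_trans hdzle (max_le_max hle (le_refl w))
      have := ih y v dz (max d0 w) hrest hy0 hdz hstep
      rw [wval_cons]
      exact this

theorem relaxB_spec {g : List (Int × List (Int × Int))} {st dst node du : Int}
    (hRVd : RV g st node du) :
    ∀ (adjl : List (Int × Int)) (dist : List (Option Int)),
    dist.length = g.length + 1 →
    (∀ e ∈ adjl, okNode g dst e.1) →
    (∀ nb wt, (nb, wt) ∈ adjl → EdgeG g node wt nb) →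
    ∃ dist', relaxB du adjl dist = some dist' ∧
      dist'.length = g.length + 1 ∧
      (∀ v dv', dAt dist' v = some dv' → dAt dist v = some dv' ∨
        (∃ w, EdgeG g node w v ∧ dv' = max du w ∧ okNode g dst v)) ∧
      (∀ v dv', dAt dist' v = some dv' → ∀ dv, dAt dist v = some dv → dv' ≤ dv) ∧
      (∀ nb wt, (nb, wt) ∈ adjl → ∃ dz, dAt dist' nb = some dz ∧ dz ≤ max du wt) ∧
      (∀ v dv, dAt dist v = some dv → dv ≤ du → dAt dist' v = dAt dist v) ∧
      (∀ v, dAt dist' v = none → dAt dist v = none) := by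
  intro adjl
  induction adjl with
  | nil =>
    intro dist hlen hok hedge
    refine ⟨dist, rfl, hlen, fun v dv' h => Or.inl h, ?_, fun nb wt h => by simp at h,
      fun v dv h _ => rfl, fun v h => h⟩
    intro v dv' h dv h2
    rw [h] at h2
    injection h2 with h3
    omega
  | cons e rest ih =>
    obtain ⟨nb, wt⟩ := e
    intro dist hlen hok hedge
    have hoknb : okNode g dst nb := hok (nb, wt) List.mem_cons_self
    have h0nb : 0 ≤ nb := hoknb.1
    have hlt : nb.toNat < dist.length := by rw [hlen]; exact okNode_lt hoknb
    have hok' : ∀ e ∈ rest, okNode g dst e.1 := fun e he => hok e (List.mem_cons_of_mem _ he)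
    have hedge' : ∀ nb' wt', (nb', wt') ∈ rest → EdgeG g node wt' nb' :=
      fun nb' wt' he => hedge nb' wt' (List.mem_cons_of_mem _ he)
    have hEhead : EdgeG g node wt nb := hedge nb wt List.mem_cons_self
    cases hup : ltO (max du wt) (dAt dist nb) with
    | true =>
      have hstep : ∀ v, dAt (dist.set nb.toNat (some (max du wt))) v =
          if v = nb then some (max du wt) else dAt dist v := dAt_update h0nb hlt _
      obtain ⟨dist', hrel, hlen', P1, P2, P3, P4, P5⟩ :=
        ih (dist.set nb.toNat (some (max du wt))) (by simpa using hlen) hok' hedge'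
      have hnbsome : dAt (dist.set nb.toNat (some (max du wt))) nb = some (max du wt) := by
        rw [hstep]; simp
      have hlow : ∀ x, dAt dist nb = some x → max du wt < x := by
        intro x hx
        rw [hx] at hup
        simpa [ltO] using hup
      have hfin : ∃ dz, dAt dist' nb = some dz ∧ dz ≤ max du wt := by
        cases hdz : dAt dist' nb with
        | none => exact absurd (P5 nb hdz) (by rw [hnbsome]; simp)
        | some dz => exact ⟨dz, rfl, P2 nb dz hdz _ hnbsome⟩
      refine ⟨dist', ?_, hlen', ?_, ?_, ?_, ?_, ?_⟩
      · simp only [relaxB, pyGet?_dAt h0nb hlt, pySetD_toSet h0nb, hup, if_true]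
        exact hrel
      · intro v dv' h
        rcases P1 v dv' h with h1 | h1
        · rw [hstep] at h1
          by_cases hv : v = nb
          · rw [if_pos hv] at h1
            injection h1 with h1
            exact Or.inr ⟨wt, hv ▸ hEhead, h1.symm, hv ▸ hoknb⟩
          · rw [if_neg hv] at h1
            exact Or.inl h1
        · exact Or.inr h1
      · intro v dv' h dv h2
        by_cases hv : v = nb
        · subst hv
          have := P2 v dv' h _ hnbsome
          have := hlow dv h2
          omega
        · exact P2 v dv' h dv (by rw [hstep, if_neg hv]; exact h2)
      · intro nb' wt' hmem
        rcases List.mem_cons.mp hmem with heq | hmem'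
        · obtain ⟨dz, hdz, hdzle⟩ := hfin
          injection heq with he1 he2
          rw [he1, he2]
          exact ⟨dz, hdz, hdzle⟩
        · exact P3 nb' wt' hmem'
      · intro v dv h hle
        by_cases hv : v = nb
        · subst hv
          exact absurd (hlow dv h) (not_lt.mpr (le_trans hle (le_max_left du wt)))
        · rw [P4 v dv (by rw [hstep, if_neg hv]; exact h) hle, hstep, if_neg hv]
      · intro v h
        have := P5 v h
        rw [hstep] at this
        by_cases hv : v = nb
        · rw [if_pos hv] at this; exact absurd this (Option.some_ne_none _)
        · rw [if_neg hv] at this; exact this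
    | false =>
      obtain ⟨dist', hrel, hlen', P1, P2, P3, P4, P5⟩ := ih dist hlen hok' hedge'
      have hx : ∃ x, dAt dist nb = some x ∧ x ≤ max du wt := by
        cases hd : dAt dist nb with
        | none => rw [hd] at hup; simp [ltO] at hup
        | some x =>
          rw [hd] at hup
          refine ⟨x, rfl, ?_⟩
          simp [ltO] at hup
          omega
      refine ⟨dist', ?_, hlen', P1, P2, ?_, P4, P5⟩
      · simp only [relaxB, pyGet?_dAt h0nb hlt, hup, Bool.false_eq_true, if_false]
        exact hrel
      · intro nb' wt' hmem
        rcases List.mem_cons.mp hmem with heq | hmem'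
        · obtain ⟨x, hxx, hxle⟩ := hx
          injection heq with he1 he2
          rw [he1, he2]
          cases hdz : dAt dist' nb with
          | none => exact absurd (P5 nb hdz) (by rw [hxx]; simp)
          | some dz => exact ⟨dz, rfl, le_trans (P2 nb dz hdz x hxx) hxle⟩
        · exact P3 nb' wt' hmem'

-- selB facts
theorem selB_some_mem : ∀ (ds : List (Option Int)) (bs : List Bool) (v0 : Nat)
    (acc : Option (Nat × Int)) (u : Nat) (du : Int),
    selB ds bs v0 acc = some (u, du) →
    acc = some (u, du) ∨ ∃ k, k < ds.length ∧ u = v0 + k ∧ bs.getD k false = false ∧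
      ds.getD k none = some du := by
  intro ds
  induction ds with
  | nil => intro bs v0 acc u du h; simp only [selB] at h; exact Or.inl h
  | cons dv ds ih =>
    intro bs v0 acc u du h
    cases bs with
    | nil => simp only [selB] at h; exact Or.inl h
    | cons bv bs =>
      simp only [selB] at h
      rcases ih bs (v0 + 1) _ u du h with hacc | ⟨k, hk, hu, hb, hd⟩
      · by_cases hbv : bv = true
        · rw [if_pos hbv] at hacc; exact Or.inl hacc
        · rw [if_neg hbv] at hacc
          cases hdv : dv with
          | none =>
            rw [hdv] at hacc
            exact Or.inl hacc
          | some x =>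
            rw [hdv] at hacc
            cases hac : acc with
            | none =>
              rw [hac] at hacc
              have hacc' : some ((v0, x) : Nat × Int) = some (u, du) := hacc
              injection hacc' with h1
              injection h1 with h2 h3
              exact Or.inr ⟨0, by simp, by omega, by simpa using hbv, by simp [hdv, h3]⟩
            | some b =>
              obtain ⟨b1, b2⟩ := b
              rw [hac] at hacc
              by_cases hx : x < b2
              · have hacc' : some ((v0, x) : Nat × Int) = some (u, du) := by
                  rw [← if_pos (c := x < b2) hx (t := some ((v0, x) : Nat × Int)) (e := some ((b1, b2) : Nat × Int))]
                  exact hacc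
                injection hacc' with h1
                injection h1 with h2 h3
                exact Or.inr ⟨0, by simp, by omega, by simpa using hbv, by simp [hdv, h3]⟩
              · have hacc' : some ((b1, b2) : Nat × Int) = some (u, du) := by
                  rw [← if_neg (c := x < b2) hx (t := some ((v0, x) : Nat × Int)) (e := some ((b1, b2) : Nat × Int))]
                  exact hacc
                exact Or.inl hacc'
      · exact Or.inr ⟨k + 1, by simpa using hk, by omega, by simpa using hb, by simpa using hd⟩

theorem selB_some_min : ∀ (ds : List (Option Int)) (bs : List Bool) (v0 : Nat)
    (acc : Option (Nat × Int)) (u : Nat) (du : Int),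
    ds.length = bs.length →
    selB ds bs v0 acc = some (u, du) →
    (∀ b, acc = some b → du ≤ b.2) ∧
    (∀ k, k < ds.length → bs.getD k false = false → ∀ x, ds.getD k none = some x → du ≤ x) := by
  intro ds
  induction ds with
  | nil =>
    intro bs v0 acc u du hlen h
    simp only [selB] at h
    refine ⟨fun b hb => ?_, fun k hk => by simp at hk⟩
    rw [hb] at h; injection h with h1; rw [h1]
  | cons dv ds ih =>
    intro bs v0 acc u du hlen h
    cases bs with
    | nil => simp at hlen
    | cons bv bs =>
      simp only [selB] at h
      have hlen' : ds.length = bs.length := by simpa using hlen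
      obtain ⟨IH1, IH2⟩ := ih bs (v0 + 1) _ u du hlen' h
      have haccb : ∀ b, acc = some b → du ≤ b.2 := by
        intro b hb
        obtain ⟨b1, b2⟩ := b
        by_cases hbv : bv = true
        · exact IH1 (b1, b2) (by rw [if_pos hbv]; exact hb)
        · cases hdv : dv with
          | none => exact IH1 (b1, b2) (by rw [if_neg hbv, hdv]; exact hb)
          | some x =>
            by_cases hx : x < b2
            · have h1 := IH1 (v0, x) (by
                rw [if_neg hbv, hdv, hb]
                exact if_pos (t := some ((v0, x) : Nat × Int)) (e := some ((b1, b2) : Nat × Int)) hx)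
              exact le_trans h1 (le_of_lt hx)
            · exact IH1 (b1, b2) (by
                rw [if_neg hbv, hdv, hb]
                exact if_neg (t := some ((v0, x) : Nat × Int)) (e := some ((b1, b2) : Nat × Int)) hx)
      refine ⟨haccb, ?_⟩
      intro k hk hbk x hd
      cases k with
      | zero =>
        have hbv : ¬ bv = true := by simpa using hbk
        have hdv : dv = some x := by simpa using hd
        cases hac : acc with
        | none =>
          have h1 := IH1 (v0, x) (by rw [if_neg hbv, hdv, hac]; try rfl)
          exact h1
        | some b =>
          obtain ⟨b1, b2⟩ := b
          by_cases hx : x < b2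
          · exact IH1 (v0, x) (by rw [if_neg hbv, hdv, hac]; exact if_pos (t := some ((v0, x) : Nat × Int)) (e := some ((b1, b2) : Nat × Int)) hx)
          · have h1 := IH1 (b1, b2) (by rw [if_neg hbv, hdv, hac]; exact if_neg (t := some ((v0, x) : Nat × Int)) (e := some ((b1, b2) : Nat × Int)) hx)
            have h2 : du ≤ b2 := h1
            omega
      | succ k => exact IH2 k (by simpa using hk) (by simpa using hbk) x (by simpa using hd)

theorem selB_none : ∀ (ds : List (Option Int)) (bs : List Bool) (v0 : Nat)
    (acc : Option (Nat × Int)),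
    ds.length = bs.length →
    selB ds bs v0 acc = none →
    acc = none ∧ ∀ k, k < ds.length → bs.getD k false = false → ds.getD k none = none := by
  intro ds
  induction ds with
  | nil =>
    intro bs v0 acc hlen h
    simp only [selB] at h
    exact ⟨h, fun k hk => by simp at hk⟩
  | cons dv ds ih =>
    intro bs v0 acc hlen h
    cases bs with
    | nil => simp at hlen
    | cons bv bs =>
      simp only [selB] at h
      have hlen' : ds.length = bs.length := by simpa using hlen
      obtain ⟨IH1, IH2⟩ := ih bs (v0 + 1) _ hlen' h
      by_cases hbv : bv = true
      · rw [if_pos hbv] at IH1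
        refine ⟨IH1, fun k hk hb => ?_⟩
        cases k with
        | zero => simp [hbv] at hb
        | succ k => simpa using IH2 k (by simpa using hk) (by simpa using hb)
      · rw [if_neg hbv] at IH1
        cases hdv : dv with
        | none =>
          have haccn : acc = none := by rw [hdv] at IH1; exact IH1
          refine ⟨haccn, fun k hk hb => ?_⟩
          cases k with
          | zero => simp [hdv]
          | succ k => simpa using IH2 k (by simpa using hk) (by simpa using hb)
        | some x =>
          exfalso
          rw [hdv] at IH1
          cases hac : acc with
          | none =>
            rw [hac] at IH1
            exact Option.some_ne_none _ (show some ((v0, x) : Nat × Int) = none from IH1)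
          | some b =>
            obtain ⟨b1, b2⟩ := b
            rw [hac] at IH1
            by_cases hx : x < b2
            · have : some ((v0, x) : Nat × Int) = none := by
                rw [← if_pos (c := x < b2) hx (t := some ((v0, x) : Nat × Int)) (e := some ((b1, b2) : Nat × Int))]
                exact IH1
              exact Option.some_ne_none _ this
            · have : some ((b1, b2) : Nat × Int) = none := by
                rw [← if_neg (c := x < b2) hx (t := some ((v0, x) : Nat × Int)) (e := some ((b1, b2) : Nat × Int))]
                exact IH1
              exact Option.some_ne_none _ this

def unvis (vis : List Bool) : Nat := vis.count false

theorem dAt_natCast (dist : List (Option Int)) (u : Nat) : dAt dist (u : Int) = dist.getD u none := by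
  simp [dAt]

theorem visAt_natCast (vis : List Bool) (u : Nat) : visAt vis (u : Int) = vis.getD u false := by
  simp [visAt]

theorem visAt_update {vis : List Bool} {u : Nat} (hu : u < vis.length) (z : Int) :
    visAt (vis.set u true) z = if z = (u : Int) then true else visAt vis z := by
  by_cases hz : z = (u : Int)
  · subst hz
    rw [if_pos rfl, visAt_natCast, List.getD_eq_getElem?_getD]
    simp [List.getElem?_set, hu]
  · rw [if_neg hz]
    by_cases hz0 : 0 ≤ z
    · have hne : u ≠ z.toNat := by omega
      simp [visAt, hz0, List.getD_eq_getElem?_getD, List.getElem?_set_ne hne]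
    · simp [visAt, hz0]

theorem unvis_set : ∀ (vis : List Bool) (u : Nat), u < vis.length →
    vis.getD u false = false → unvis (vis.set u true) + 1 = unvis vis := by
  intro vis
  induction vis with
  | nil => intro u hu; simp at hu
  | cons b t ih =>
    intro u hu hf
    cases u with
    | zero =>
      have hb : b = false := by simpa using hf
      subst hb
      simp [unvis, List.count_cons]
    | succ k =>
      have := ih k (by simpa using hu) (by simpa using hf)
      simp only [unvis, List.set, List.count_cons] at *
      omega

theorem loopB_correct {g : List (Int × List (Int × Int))} {st dst : Int}
    (hPre : PreStrong g st dst) :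
    ∀ (fuel : Nat) (dist : List (Option Int)) (vis : List Bool),
    InvB g st dst dist vis → unvis vis < fuel →
    ∃ r, loopB g dst fuel dist vis = some r ∧ IsAns g st dst r := by
  intro fuel
  induction fuel with
  | zero =>
    intro dist vis hInv hM
    exact absurd hM (Nat.not_lt_zero _)
  | succ f ihf =>
    intro dist vis hInv hM
    obtain ⟨hlen, hvlen, B2, B4, B6, B8⟩ := hInv
    have hInvFull : InvB g st dst dist vis := ⟨hlen, hvlen, B2, B4, B6, B8⟩
    have hlen2 : dist.length = vis.length := by omega
    cases hsel : selB dist vis 0 none with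
    | none =>
      refine ⟨-1, by simp only [loopB, hsel], ?_⟩
      right
      refine ⟨?_, rfl⟩
      rintro ⟨dd, s, hs, hv⟩
      obtain ⟨ds, hds, hds0⟩ := B8
      rcases chaseB hPre hInvFull s st dst ds 0 hs hPre.h0st hds hds0 with
        ⟨y, dy, hy0, hyvis, hydist, _⟩ | ⟨hvd, _⟩
      · obtain ⟨_, hall⟩ := selB_none dist vis 0 none hlen2 hsel
        have hylt : y.toNat < dist.length := (dAt_some_lt hydist).2
        have hnone : dist.getD y.toNat none = none :=
          hall y.toNat hylt (by simpa [visAt, hy0] using hyvis)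
        rw [dAt, if_pos hy0, hnone] at hydist
        exact absurd hydist (by simp)
      · rw [B6] at hvd
        exact Bool.noConfusion hvd
    | some p =>
      obtain ⟨u, du⟩ := p
      rcases selB_some_mem dist vis 0 none u du hsel with h | ⟨k, hk, huk, hbk, hdk⟩
      · exact absurd h (by simp)
      obtain rfl : u = k := by omega
      have hu0 : (0 : Int) ≤ (u : Int) := Int.natCast_nonneg u
      have hdAtu : dAt dist (u : Int) = some du := by rw [dAt_natCast]; exact hdk
      have hvisu : visAt vis (u : Int) = false := by rw [visAt_natCast]; exact hbk
      have hmin := (selB_some_min dist vis 0 none u du hlen2 hsel).2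
      obtain ⟨hRVu, hoku, huR⟩ := B2 (u : Int) du hu0 hdAtu
      have hdu0 : 0 ≤ du := RV_nonneg hRVu
      by_cases hdest : (u : Int) = dst
      · refine ⟨du, by simp only [loopB, hsel, if_pos hdest], ?_⟩
        left
        refine ⟨hdest ▸ hRVu, ?_⟩
        rintro d' ⟨s, hs, hv⟩
        obtain ⟨ds, hds, hds0⟩ := B8
        rcases chaseB hPre hInvFull s st dst ds 0 hs hPre.h0st hds hds0 with
          ⟨y, dy, hy0, hyvis, hydist, hyle⟩ | ⟨hvd, _⟩
        · have hylt : y.toNat < dist.length := (dAt_some_lt hydist).2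
          have hdy : dist.getD y.toNat none = some dy := by
            rw [dAt, if_pos hy0] at hydist; exact hydist
          have hle1 := hmin y.toNat hylt (by simpa [visAt, hy0] using hyvis) dy hdy
          rw [hv] at hyle
          omega
        · rw [B6] at hvd
          exact Bool.noConfusion hvd
      · obtain ⟨adjl, hadj⟩ := okNode_adjFind hoku hdest
        have hmemg : ((u : Int), adjl) ∈ g := adjFind_mem hadj
        have hokedges : ∀ e ∈ adjl, okNode g dst e.1 := fun e he => hPre.hedges _ hmemg huR e he
        have hedges : ∀ nb wt, (nb, wt) ∈ adjl → EdgeG g (u : Int) wt nb :=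
          fun nb wt h => ⟨adjl, hadj, h⟩
        obtain ⟨dist', hrel, hlen', P1, P2, P3, P4, P5⟩ :=
          relaxB_spec hRVu adjl dist hlen hokedges hedges
        have hsomeKeep : ∀ v dv, dAt dist v = some dv → ∃ dv', dAt dist' v = some dv' ∧ dv' ≤ dv := by
          intro v dv hdv
          cases hdd : dAt dist' v with
          | none => exact absurd (P5 v hdd) (by rw [hdv]; simp)
          | some dv' => exact ⟨dv', rfl, P2 v dv' hdd dv hdv⟩
        have hulen : u < vis.length := by omega
        have hvis' : ∀ z, visAt (vis.set u true) z = if z = (u : Int) then true else visAt vis z :=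
          visAt_update hulen
        have hInv' : InvB g st dst dist' (vis.set u true) := by
          refine ⟨hlen', by simpa using hvlen, ?_, ?_, ?_, ?_⟩
          · intro v dv hv0 hdv
            rcases P1 v dv hdv with h1 | h1
            · exact B2 v dv hv0 h1
            · obtain ⟨w, hew, hdvw, hokv⟩ := h1
              subst hdvw
              exact ⟨RV_step hRVu hew, hokv, (edge_okR hPre huR hdest hew).2⟩
          · intro y hy0 hyvis
            rw [hvis'] at hyvis
            by_cases hyu : y = (u : Int)
            · have hdAty : dAt dist y = some du := by rw [hyu]; exact hdAtu
              have hstay : dAt dist' y = some du := by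
                rw [P4 y du hdAty (le_refl du)]
                exact hdAty
              refine ⟨du, hstay, ?_, ?_⟩
              · intro w z hez
                obtain ⟨l', hadj', hz⟩ := hez
                rw [hyu, hadj] at hadj'
                injection hadj' with hl'
                subst hl'
                exact P3 z w hz
              · intro z dz hz0 hzvis hzdist
                rw [hvis'] at hzvis
                by_cases hzu : z = (u : Int)
                · rw [if_pos hzu] at hzvis; exact Bool.noConfusion hzvis
                · rw [if_neg hzu] at hzvis
                  rcases P1 z dz hzdist with h1 | h1
                  · have hzlt : z.toNat < dist.length := (dAt_some_lt h1).2
                    exact hmin z.toNat hzlt (by simpa [visAt, hz0] using hzvis) dz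
                      (by rw [dAt, if_pos hz0] at h1; exact h1)
                  · obtain ⟨w, _, hdzw, _⟩ := h1
                    subst hdzw
                    exact le_max_left _ _
            · rw [if_neg hyu] at hyvis
              obtain ⟨dy, hdy, hedges0, hminy⟩ := B4 y hy0 hyvis
              have hdydu : dy ≤ du := hminy (u : Int) du hu0 hvisu hdAtu
              have hstay : dAt dist' y = some dy := by
                rw [P4 y dy hdy hdydu]
                exact hdy
              refine ⟨dy, hstay, ?_, ?_⟩
              · intro w z hez
                obtain ⟨dz, hdz, hdzle⟩ := hedges0 w z hez
                obtain ⟨dz', hdz', hdz'le⟩ := hsomeKeep z dz hdz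
                exact ⟨dz', hdz', le_trans hdz'le hdzle⟩
              · intro z dz hz0 hzvis hzdist
                rw [hvis'] at hzvis
                by_cases hzu : z = (u : Int)
                · rw [if_pos hzu] at hzvis; exact Bool.noConfusion hzvis
                · rw [if_neg hzu] at hzvis
                  rcases P1 z dz hzdist with h1 | h1
                  · exact hminy z dz hz0 hzvis h1
                  · obtain ⟨w, _, hdzw, _⟩ := h1
                    subst hdzw
                    exact le_trans hdydu (le_max_left _ _)
          · rw [hvis', if_neg (fun h => hdest h.symm)]
            exact B6
          · obtain ⟨ds, hds, hds0⟩ := B8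
            refine ⟨ds, ?_, hds0⟩
            rw [P4 st ds hds (le_trans hds0 hdu0)]
            exact hds
        have hM' : unvis (vis.set u true) < f := by
          have := unvis_set vis u hulen hbk
          omega
        obtain ⟨r, hloop, hAns⟩ := ihf dist' (vis.set u true) hInv' hM'
        refine ⟨r, ?_, hAns⟩
        simp only [loopB, hsel, if_neg hdest, hadj, hrel]
        exact hloop

-- ===== VERDICT (by name: the statement is the Claim_ definition above) =====
theorem dAt_replicate (m : Nat) (v : Int) :
    dAt (List.replicate m (none : Option Int)) v = none := by
  unfold dAt
  split
  · rw [List.getD_eq_getElem?_getD, List.getElem?_replicate]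
    split <;> rfl
  · rfl

theorem visAt_replicate (m : Nat) (z : Int) :
    visAt (List.replicate m false) z = false := by
  unfold visAt
  split
  · rw [List.getD_eq_getElem?_getD, List.getElem?_replicate]
    split <;> rfl
  · rfl

theorem adjFind_of_mem_nodup {g : List (Int × List (Int × Int))} {k : Int}
    {l : List (Int × Int)} (h : (k, l) ∈ g) (hnd : (g.map Prod.fst).Nodup) :
    adjFind g k = some l := by
  induction g with
  | nil => simp at h
  | cons p rest ih =>
    rw [adjFind]
    rcases List.mem_cons.mp h with heq | h'
    · rw [← heq]
      simp
    · have hnd2 : (p.1 :: rest.map Prod.fst).Nodup := by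
        rw [List.map_cons] at hnd
        exact hnd
      have hnd' := List.nodup_cons.mp hnd2
      have hk : p.1 ≠ k := by
        intro hpk
        exact hnd'.1 (hpk ▸ List.mem_map.mpr ⟨(k, l), h', rfl⟩)
      rw [if_neg hk]
      exact ih h' hnd'.2

theorem loopA_start_empty (g : List (Int × List (Int × Int))) (st dst : Int)
    (hne : ¬ st = dst) (hadj : adjFind g st = some []) (f : Nat) (dist : List (Option Int)) :
    loopA g dst (f + 2) dist [(0, st)] = some (-1) := by
  show loopA g dst ((f + 1) + 1) dist [(0, st)] = some (-1)
  simp [loopA, pqMinA, hne, hadj, relaxA]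

theorem loopB_start_empty (g : List (Int × List (Int × Int))) (st dst : Int)
    (h0st : 0 ≤ st) (hstle : st ≤ (g.length : Int)) (hne : ¬ st = dst)
    (hadj : adjFind g st = some []) (f : Nat) :
    loopB g dst (f + 2)
      (PySem.List.pySetD (List.replicate (g.length + 1) (none : Option Int)) st (some 0))
      (List.replicate (g.length + 1) false) = some (-1) := by
  have hstlt : st.toNat < g.length + 1 := by omega
  have hset : PySem.List.pySetD (List.replicate (g.length + 1) (none : Option Int)) st (some 0) =
      (List.replicate (g.length + 1) (none : Option Int)).set st.toNat (some 0) :=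
    pySetD_toSet h0st _
  have hd1 : ∀ v, dAt (PySem.List.pySetD (List.replicate (g.length + 1) (none : Option Int)) st
      (some 0)) v = if v = st then some 0 else none := by
    intro v
    rw [hset, dAt_update h0st (by simpa using hstlt) (some 0) v, dAt_replicate]
  have hlen1 : (PySem.List.pySetD (List.replicate (g.length + 1) (none : Option Int)) st
      (some 0)).length = g.length + 1 := by
    rw [hset]; simp
  have hgd : (PySem.List.pySetD (List.replicate (g.length + 1) (none : Option Int)) st
      (some 0)).getD st.toNat none = some 0 := by
    have h := hd1 ((st.toNat : Nat) : Int)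
    rw [dAt_natCast] at h
    simpa [Int.toNat_of_nonneg h0st] using h
  show loopB g dst ((f + 1) + 1) _ _ = some (-1)
  cases hsel : selB (PySem.List.pySetD (List.replicate (g.length + 1) (none : Option Int)) st
      (some 0)) (List.replicate (g.length + 1) false) 0 none with
  | none =>
    obtain ⟨_, hall⟩ := selB_none _ _ 0 none (by rw [hlen1]; simp) hsel
    have hf : (List.replicate (g.length + 1) false).getD st.toNat false = false := by
      rw [← visAt_natCast]
      exact visAt_replicate _ _
    have := hall st.toNat (by rw [hlen1]; exact hstlt) hf
    rw [hgd] at this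
    exact absurd this (by simp)
  | some p =>
    obtain ⟨u, du⟩ := p
    rcases selB_some_mem _ _ 0 none u du hsel with h | ⟨k, hk, huk, hbk, hdk⟩
    · exact absurd h (by simp)
    obtain rfl : u = k := by omega
    have hdAtk : dAt (PySem.List.pySetD (List.replicate (g.length + 1) (none : Option Int)) st
        (some 0)) (u : Int) = some du := by rw [dAt_natCast]; exact hdk
    rw [hd1] at hdAtk
    by_cases hku : (u : Int) = st
    · have hust : u = st.toNat := by omega
      have hne' : ¬ (u : Int) = dst := by rw [hku]; exact hne
      have hadju : adjFind g (u : Int) = some [] := by rw [hku]; exact hadj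
      simp only [loopB, hsel, if_neg hne', hadju, relaxB]
      -- second round: the only finite dist slot is now visited, selB finds nothing
      cases hsel2 : selB (PySem.List.pySetD (List.replicate (g.length + 1) (none : Option Int))
          st (some 0)) ((List.replicate (g.length + 1) false).set u true) 0 none with
      | none => simp only [loopB, hsel2]
      | some q =>
        obtain ⟨u2, du2⟩ := q
        exfalso
        rcases selB_some_mem _ _ 0 none u2 du2 hsel2 with h | ⟨k2, hk2, huk2, hbk2, hdk2⟩
        · exact absurd h (by simp)
        have hdAtk2 : dAt (PySem.List.pySetD (List.replicate (g.length + 1) (none : Option Int))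
            st (some 0)) (k2 : Int) = some du2 := by rw [dAt_natCast]; exact hdk2
        rw [hd1] at hdAtk2
        by_cases hk2u : (k2 : Int) = st
        · have : k2 = u := by omega
          subst this
          rw [List.getD_eq_getElem?_getD, List.getElem?_set_self (by simpa [hust] using hstlt)] at hbk2
          simp at hbk2
        · rw [if_neg hk2u] at hdAtk2
          exact absurd hdAtk2 (by simp)
    · rw [if_neg hku] at hdAtk
      exact absurd hdAtk (by simp)

theorem loopA_first_dest (g : List (Int × List (Int × Int))) (dst : Int) (f : Nat)
    (dist : List (Option Int)) : loopA g dst (f + 1) dist [(0, dst)] = some 0 := by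
  simp [loopA, pqMinA]

theorem shortest_max_weight_spec : Claim_equal_shortest_max_weight := by
  unfold Claim_equal_shortest_max_weight
  intro g st dst hDom hPre
  unfold Spec_shortest_max_weight
  rcases hPre with ⟨hsd, hge, hle⟩ | ⟨h0st, hstle, hnd, hbr2⟩
  · -- start == dest: A returns 0 at the first pop, B by its explicit guard
    subst hsd
    have hA : loopA g st (2 * (g.length + 1) * ((g.flatMap (fun p => p.2)).length + 1) + 2)
        (PySem.List.pySetD (List.replicate (g.length + 1) (none : Option Int)) st (some 0))
        [(0, st)] = some 0 :=
      loopA_first_dest g st (2 * (g.length + 1) * ((g.flatMap (fun p => p.2)).length + 1) + 1) _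
    simp only [shortest_max_weight, shortest_max_weight_alt]
    rw [hA]
    simp
  · by_cases hsd : st = dst
    · -- start == dest again: A's immediate return against B's guard
      subst hsd
      have hA : loopA g st (2 * (g.length + 1) * ((g.flatMap (fun p => p.2)).length + 1) + 2)
          (PySem.List.pySetD (List.replicate (g.length + 1) (none : Option Int)) st (some 0))
          [(0, st)] = some 0 :=
        loopA_first_dest g st (2 * (g.length + 1) * ((g.flatMap (fun p => p.2)).length + 1) + 1) _
      simp only [shortest_max_weight, shortest_max_weight_alt]
      rw [hA]
      simp
    rcases hbr2 with hempty | ⟨hkey, hedgesW⟩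
    · -- start's adjacency list is empty: both searches die after the first visit
      have hadj : adjFind g st = some [] := adjFind_of_mem_nodup hempty hnd
      have hA : loopA g dst (2 * (g.length + 1) * ((g.flatMap (fun p => p.2)).length + 1) + 2)
          (PySem.List.pySetD (List.replicate (g.length + 1) (none : Option Int)) st (some 0))
          [(0, st)] = some (-1) :=
        loopA_start_empty g st dst hsd hadj
          (2 * (g.length + 1) * ((g.flatMap (fun p => p.2)).length + 1)) _
      have hB : loopB g dst (g.length + 2)
          (PySem.List.pySetD (List.replicate (g.length + 1) (none : Option Int)) st (some 0))
          (List.replicate (g.length + 1) false) = some (-1) :=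
        loopB_start_empty g st dst h0st hstle hsd hadj g.length
      simp only [shortest_max_weight, shortest_max_weight_alt, if_neg hsd]
      rw [hA, hB]
    obtain ⟨hclosed, hedgesW⟩ := hedgesW
    have hstkey : st = dst ∨ (adjFind g st).isSome = true :=
      Or.inr (adjFind_isSome_of_mem hkey)
    have hedges : ∀ p ∈ g, p.1 ∈ ReachR g st dst → ∀ e ∈ p.2,
        0 ≤ e.1 ∧ e.1 ≤ (g.length : Int) ∧ (e.1 = dst ∨ (adjFind g e.1).isSome = true) := by
      intro p hp hpR e he
      obtain ⟨h1, h2, h3⟩ := hedgesW p hp hpR e he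
      exact ⟨h1, h2, h3.imp id adjFind_isSome_of_mem⟩
    have hPre' : PreStrong g st dst := ⟨hnd, h0st, hstle, hstkey, hclosed, hedges⟩
    have hstlt : st.toNat < g.length + 1 := by omega
    have hset : PySem.List.pySetD (List.replicate (g.length + 1) (none : Option Int)) st (some 0) =
        (List.replicate (g.length + 1) (none : Option Int)).set st.toNat (some 0) :=
      pySetD_toSet h0st _
    have hd1 : ∀ v, dAt (PySem.List.pySetD (List.replicate (g.length + 1) (none : Option Int)) st
        (some 0)) v = if v = st then some 0 else none := by
      intro v
      rw [hset, dAt_update h0st (by simpa using hstlt) (some 0) v, dAt_replicate]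
    have hlen1 : (PySem.List.pySetD (List.replicate (g.length + 1) (none : Option Int)) st
        (some 0)).length = g.length + 1 := by
      rw [hset]; simp
    have hokst : okNode g dst st := ⟨h0st, hstle, hstkey⟩
    -- A side
    have hInvA : InvA g st dst (fun _ => False) 0
        (PySem.List.pySetD (List.replicate (g.length + 1) (none : Option Int)) st (some 0))
        [(0, st)] := by
      refine ⟨hlen1, ?_, ?_, ?_, ?_, ?_, ?_⟩
      · intro e he
        simp only [List.mem_singleton] at he
        subst he
        exact ⟨le_refl _, ⟨0, by rw [hd1, if_pos rfl], le_refl _⟩, RV_start g st,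
          zero_mem_valS g, hokst, st_mem_ReachR g st dst⟩
      · intro v dv hv0 hdv
        rw [hd1] at hdv
        by_cases hv : v = st
        · rw [if_pos hv] at hdv
          injection hdv with hdv
          rw [hv, ← hdv]
          exact ⟨RV_start g st, zero_mem_valS g⟩
        · rw [if_neg hv] at hdv
          exact absurd hdv (by simp)
      · intro v hv0 hP dv hdv
        rw [hd1] at hdv
        by_cases hv : v = st
        · rw [if_pos hv] at hdv
          injection hdv with hdv
          rw [hv, ← hdv]
          exact List.mem_cons_self
        · rw [if_neg hv] at hdv
          exact absurd hdv (by simp)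
      · intro y hy
        exact absurd hy (fun h => h)
      · exact fun h => h
      · exact ⟨0, by rw [hd1, if_pos rfl], le_refl _⟩
    have hMA : 2 * phi g (PySem.List.pySetD (List.replicate (g.length + 1) (none : Option Int)) st
        (some 0)) + 1 < 2 * (g.length + 1) * ((g.flatMap (fun p => p.2)).length + 1) + 2 := by
      have h1 := phi_le g (PySem.List.pySetD (List.replicate (g.length + 1) (none : Option Int)) st (some 0))
      rw [hlen1] at h1
      have h2 := card_valS_le g
      have h3 : (g.length + 1) * (valS g).card ≤
          (g.length + 1) * ((g.flatMap (fun p => p.2)).length + 1) :=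
        Nat.mul_le_mul_left _ h2
      have h4 : phi g (PySem.List.pySetD (List.replicate (g.length + 1) (none : Option Int)) st
          (some 0)) ≤ (g.length + 1) * ((g.flatMap (fun p => p.2)).length + 1) := le_trans h1 h3
      rw [Nat.mul_assoc]
      omega
    obtain ⟨r, hloopA, hAnsA⟩ := loopA_correct hPre'
      (2 * (g.length + 1) * ((g.flatMap (fun p => p.2)).length + 1) + 2)
      (PySem.List.pySetD (List.replicate (g.length + 1) (none : Option Int)) st (some 0))
      [(0, st)] (fun _ => False) 0 hInvA (by simpa using hMA)
    -- B side
    have hInvB : InvB g st dst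
        (PySem.List.pySetD (List.replicate (g.length + 1) (none : Option Int)) st (some 0))
        (List.replicate (g.length + 1) false) := by
      refine ⟨hlen1, by simp, ?_, ?_, visAt_replicate _ _, ?_⟩
      · intro v dv hv0 hdv
        rw [hd1] at hdv
        by_cases hv : v = st
        · rw [if_pos hv] at hdv
          injection hdv with hdv
          rw [hv, ← hdv]
          exact ⟨RV_start g st, hokst, st_mem_ReachR g st dst⟩
        · rw [if_neg hv] at hdv
          exact absurd hdv (by simp)
      · intro y hy0 hyvis
        rw [visAt_replicate] at hyvis
        exact absurd hyvis (by simp)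
      · exact ⟨0, by rw [hd1, if_pos rfl], le_refl _⟩
    have hMB : unvis (List.replicate (g.length + 1) false) < g.length + 2 := by
      simp [unvis, List.count_replicate]
    obtain ⟨r', hloopB, hAnsB⟩ := loopB_correct hPre' (g.length + 2)
      (PySem.List.pySetD (List.replicate (g.length + 1) (none : Option Int)) st (some 0))
      (List.replicate (g.length + 1) false) hInvB hMB
    have hrr : r = r' := IsAns_unique hAnsA hAnsB
    simp only [shortest_max_weight, shortest_max_weight_alt, if_neg hsd]
    rw [hloopA, hloopB, hrr]
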